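-- pv_equiv track=rewrite | github.com/Freewillll/neuron2seq | datasets/treeparser.py | trim_out_of_box
-- ===== SOURCE A (Python) =====
-- def is_in_box(x, y, z, imgshape):
--     """
--     imgshape must be in (z,y,x) order
--     """
--     if x < 0 or y < 0 or z < 0 or \
--             x > imgshape[2] - 1 or \
--             y > imgshape[1] - 1 or \
--             z > imgshape[0] - 1:
--         return False
--     return True
--
-- def trim_out_of_box(tree_orig, imgshape, keep_candidate_points=True):
--     """
--     Trim the out-of-box leaves
--     """
--     # execute trimming
--     child_dict = {}
--     for leaf in tree_orig:
--         if leaf[-1] in child_dict: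
--             child_dict[leaf[-1]].append(leaf[0])
--         else:
--             child_dict[leaf[-1]] = [leaf[0]]
--
--     pos_dict = {}
--     for i, leaf in enumerate(tree_orig):
--         pos_dict[leaf[0]] = leaf
--
--     tree = []
--     for i, leaf in enumerate(tree_orig):
--         idx, type_, x, y, z, r, p = leaf
--         ib = is_in_box(x, y, z, imgshape)
--         leaf = (idx, type_, x, y, z, r, p, ib)
--         if ib:
--             tree.append(leaf)
--         elif keep_candidate_points:
--             if p in pos_dict and is_in_box(*pos_dict[p][2:5], imgshape):
--                 tree.append(leaf)
--             elif idx in child_dict: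
--                 for ch_leaf in child_dict[idx]:
--                     if is_in_box(*pos_dict[ch_leaf][2:5], imgshape):
--                         tree.append(leaf)
--                         break
--     return tree
-- ===== SOURCE B (Python) =====
-- def is_in_box(x, y, z, imgshape):
--     """
--     imgshape must be in (z,y,x) order
--     """
--     if x < 0 or y < 0 or z < 0 or \
--             x > imgshape[2] - 1 or \
--             y > imgshape[1] - 1 or \
--             z > imgshape[0] - 1:
--         return False
--     return True
--
-- def trim_out_of_box(tree_orig, imgshape, keep_candidate_points=True):
--     """
--     Trim the out-of-box leaves (table-driven: two precomputed sets, no inner scan)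
--     """
--     # id -> leaf (last occurrence wins, as in a dict built over the whole list)
--     pos_dict = {leaf[0]: leaf for leaf in tree_orig}
--     # ids whose (current) node is inside the box
--     inbox_ids = {i for i, l in pos_dict.items()
--                  if is_in_box(l[2], l[3], l[4], imgshape)}
--     # parents that have at least one in-box child
--     parents_with_inbox_child = {leaf[-1] for leaf in tree_orig
--                                 if leaf[0] in inbox_ids}
--
--     tree = []
--     for leaf in tree_orig:
--         idx, type_, x, y, z, r, p = leaf
--         ib = is_in_box(x, y, z, imgshape)
--         if ib:
--             tree.append((idx, type_, x, y, z, r, p, ib))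
--         elif keep_candidate_points and (p in inbox_ids
--                                         or idx in parents_with_inbox_child):
--             tree.append((idx, type_, x, y, z, r, p, ib))
--     return tree
-- ===== Notes on version B (the rewrite author's own statement) =====
-- stated objective: simpler
-- what changed: A scans each out-of-box node's child list (built per parent) and re-tests each child's coordinates; B precomputes the set of in-box ids and the set of parents having an in-box child, so the per-leaf decision is two set-membership tests with no inner scan.
import Mathlib
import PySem

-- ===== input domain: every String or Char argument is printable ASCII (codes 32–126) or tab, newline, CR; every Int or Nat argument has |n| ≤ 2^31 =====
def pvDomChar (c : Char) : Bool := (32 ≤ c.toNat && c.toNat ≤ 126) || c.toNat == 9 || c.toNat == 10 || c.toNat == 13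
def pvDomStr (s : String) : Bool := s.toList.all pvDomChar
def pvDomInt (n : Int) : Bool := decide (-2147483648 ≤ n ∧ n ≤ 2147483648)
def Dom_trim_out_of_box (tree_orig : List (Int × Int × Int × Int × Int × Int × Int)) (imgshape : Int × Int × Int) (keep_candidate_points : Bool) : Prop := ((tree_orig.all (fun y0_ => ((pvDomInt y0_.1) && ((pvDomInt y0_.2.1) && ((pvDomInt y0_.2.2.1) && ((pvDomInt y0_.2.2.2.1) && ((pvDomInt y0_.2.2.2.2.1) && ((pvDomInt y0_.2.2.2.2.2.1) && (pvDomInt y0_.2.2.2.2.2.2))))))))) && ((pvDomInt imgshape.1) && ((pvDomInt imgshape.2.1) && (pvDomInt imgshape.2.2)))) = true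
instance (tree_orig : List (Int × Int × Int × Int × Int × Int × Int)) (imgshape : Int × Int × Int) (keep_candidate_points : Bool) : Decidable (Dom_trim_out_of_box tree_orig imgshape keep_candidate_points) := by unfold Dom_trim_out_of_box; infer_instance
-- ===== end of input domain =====

-- B replaces A's per-leaf inner scan over a node's children by two precomputed sets
-- (in-box ids, parents with an in-box child), one membership test each: objective 'simpler'.

abbrev PvLeaf := Int × Int × Int × Int × Int × Int × Int

-- shared module-level helper is_in_box (identical in Source A and Source B)
def pv_is_in_box (x y z : Int) (imgshape : Int × Int × Int) : Bool :=
  if x < 0 ∨ y < 0 ∨ z < 0 ∨ x > imgshape.2.2 - 1 ∨ y > imgshape.2.1 - 1 ∨ z > imgshape.1 - 1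
  then false else true

-- id -> leaf dict, built identically by both Pythons (A: loop of inserts, B: dict comprehension)
def pvPosDict (tree_orig : List PvLeaf) : PySem.Dict Int PvLeaf :=
  tree_orig.foldl (fun d leaf => d.insert leaf.1 leaf) PySem.Dict.empty

-- ===== PORT A =====
-- parent id -> list of child ids (A's first loop; append-or-create branch kept)
def pvChildDict (tree_orig : List PvLeaf) : PySem.Dict Int (List Int) :=
  tree_orig.foldl
    (fun d leaf =>
      if d.contains leaf.2.2.2.2.2.2 then
        d.insert leaf.2.2.2.2.2.2 (d.getD leaf.2.2.2.2.2.2 [] ++ [leaf.1])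
      else
        d.insert leaf.2.2.2.2.2.2 [leaf.1])
    PySem.Dict.empty

-- is_in_box(*pos_dict[k][2:5], imgshape); the none branch (Python KeyError) is unreachable in A:
-- every looked-up id is some leaf[0], hence a key of pos_dict
def pvPosInBox (pos_dict : PySem.Dict Int PvLeaf) (k : Int) (imgshape : Int × Int × Int) : Bool :=
  match pos_dict.get? k with
  | some l => pv_is_in_box l.2.2.1 l.2.2.2.1 l.2.2.2.2.1 imgshape
  | none => false

def trim_out_of_box (tree_orig : List PvLeaf) (imgshape : Int × Int × Int) (keep_candidate_points : Bool) : List (Int × Int × Int × Int × Int × Int × Int × Bool) :=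
  let child_dict := pvChildDict tree_orig
  let pos_dict := pvPosDict tree_orig
  tree_orig.foldl
    (fun tree leaf =>
      let idx := leaf.1; let type_ := leaf.2.1; let x := leaf.2.2.1; let y := leaf.2.2.2.1
      let z := leaf.2.2.2.2.1; let r := leaf.2.2.2.2.2.1; let p := leaf.2.2.2.2.2.2
      let ib := pv_is_in_box x y z imgshape
      let leaf' := (idx, type_, x, y, z, r, p, ib)
      if ib then tree ++ [leaf']
      else if keep_candidate_points then
        if pos_dict.contains p && pvPosInBox pos_dict p imgshape then tree ++ [leaf']
        else if child_dict.contains idx then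
          if (child_dict.getD idx []).any (fun ch => pvPosInBox pos_dict ch imgshape)
          then tree ++ [leaf'] else tree
        else tree
      else tree)
    []

-- ===== PORT B =====
def trim_out_of_box_alt (tree_orig : List PvLeaf) (imgshape : Int × Int × Int) (keep_candidate_points : Bool) : List (Int × Int × Int × Int × Int × Int × Int × Bool) :=
  let pos_dict := pvPosDict tree_orig
  let inbox_ids : PySem.Set Int :=
    PySem.Set.ofList
      ((pos_dict.items.filter
          (fun il => pv_is_in_box il.2.2.2.1 il.2.2.2.2.1 il.2.2.2.2.2.1 imgshape)).map (·.1))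
  let parents_with_inbox_child : PySem.Set Int :=
    PySem.Set.ofList
      ((tree_orig.filter (fun leaf => inbox_ids.contains leaf.1)).map (·.2.2.2.2.2.2))
  tree_orig.foldl
    (fun tree leaf =>
      let idx := leaf.1; let type_ := leaf.2.1; let x := leaf.2.2.1; let y := leaf.2.2.2.1
      let z := leaf.2.2.2.2.1; let r := leaf.2.2.2.2.2.1; let p := leaf.2.2.2.2.2.2
      let ib := pv_is_in_box x y z imgshape
      if ib then tree ++ [(idx, type_, x, y, z, r, p, ib)]
      else if keep_candidate_points &&
              (inbox_ids.contains p || parents_with_inbox_child.contains idx) then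
        tree ++ [(idx, type_, x, y, z, r, p, ib)]
      else tree)
    []

-- ===== PRECONDITION & SPEC =====
-- (no Pre_: A is total)
-- DecidableEq for the 8-tuple, assembled stepwise (plain instance search exceeds its default size limit)
def pvDec2 : DecidableEq (Int × Bool) := inferInstance
def pvDec3 : DecidableEq (Int × Int × Bool) := @instDecidableEqProd _ _ _ pvDec2
def pvDec4 : DecidableEq (Int × Int × Int × Bool) := @instDecidableEqProd _ _ _ pvDec3
def pvDec5 : DecidableEq (Int × Int × Int × Int × Bool) := @instDecidableEqProd _ _ _ pvDec4
def pvDec6 : DecidableEq (Int × Int × Int × Int × Int × Bool) := @instDecidableEqProd _ _ _ pvDec5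
def pvDec7 : DecidableEq (Int × Int × Int × Int × Int × Int × Bool) := @instDecidableEqProd _ _ _ pvDec6
def pvDec8 : DecidableEq (Int × Int × Int × Int × Int × Int × Int × Bool) := @instDecidableEqProd _ _ _ pvDec7

def Spec_trim_out_of_box (tree_orig : List (Int × Int × Int × Int × Int × Int × Int)) (imgshape : Int × Int × Int) (keep_candidate_points : Bool) (out : List (Int × Int × Int × Int × Int × Int × Int × Bool)) : Prop := out = trim_out_of_box_alt tree_orig imgshape keep_candidate_points
instance (tree_orig : List (Int × Int × Int × Int × Int × Int × Int)) (imgshape : Int × Int × Int) (keep_candidate_points : Bool) (out : List (Int × Int × Int × Int × Int × Int × Int × Bool)) : Decidable (Spec_trim_out_of_box tree_orig imgshape keep_candidate_points out) := by unfold Spec_trim_out_of_box; exact @instDecidableEqList _ pvDec8 _ _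

-- ===== CLAIM (what is proved, stated in full; the proofs are below) =====
def Claim_equal_trim_out_of_box : Prop := ∀ (tree_orig : List (Int × Int × Int × Int × Int × Int × Int)) (imgshape : Int × Int × Int) (keep_candidate_points : Bool), Dom_trim_out_of_box tree_orig imgshape keep_candidate_points → Spec_trim_out_of_box tree_orig imgshape keep_candidate_points (trim_out_of_box tree_orig imgshape keep_candidate_points)

-- ===== LEMMAS AND PROOFS =====

theorem pvPosDict_nodup (tree_orig : List PvLeaf) : (pvPosDict tree_orig).keys.Nodup := by
  have := PySem.Dict.nodup_keys_foldl_insert_key tree_orig (fun l => l.1) (fun _ l => l)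
    PySem.Dict.empty (by simp [pysem])
  simpa [pvPosDict] using this

theorem pv_contains_and_chk (pos : PySem.Dict Int PvLeaf) (k : Int) (imgshape : Int × Int × Int) :
    (pos.contains k && pvPosInBox pos k imgshape) = pvPosInBox pos k imgshape := by
  unfold pvPosInBox
  rw [PySem.Dict.contains_eq_isSome_get?]
  cases h : pos.get? k <;> simp

theorem pvChk_eq_inbox (tree_orig : List PvLeaf) (imgshape : Int × Int × Int) (k : Int) :
    pvPosInBox (pvPosDict tree_orig) k imgshape =
    (PySem.Set.ofList
      (((pvPosDict tree_orig).items.filter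
          (fun il => pv_is_in_box il.2.2.2.1 il.2.2.2.2.1 il.2.2.2.2.2.1 imgshape)).map (·.1))).contains k := by
  have hnd := pvPosDict_nodup tree_orig
  rw [Bool.eq_iff_iff]
  simp only [pysem, List.elem_iff, PySem.Set.mem_ofList, List.mem_map, List.mem_filter]
  unfold pvPosInBox
  constructor
  · intro hl
    cases h : (pvPosDict tree_orig).get? k with
    | none => rw [h] at hl; simp at hl
    | some l =>
        rw [h] at hl
        exact ⟨(k, l), ⟨(PySem.Dict.get?_eq_some_iff_mem_items _ _ _ hnd).mp h, hl⟩, rfl⟩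
  · rintro ⟨⟨k', l⟩, ⟨hmem, hbox⟩, rfl⟩
    rw [(PySem.Dict.get?_eq_some_iff_mem_items _ _ _ hnd).mpr hmem]
    exact hbox

theorem pvChildDict_step (d : PySem.Dict Int (List Int)) (leaf : PvLeaf) :
    (if d.contains leaf.2.2.2.2.2.2 then
        d.insert leaf.2.2.2.2.2.2 (d.getD leaf.2.2.2.2.2.2 [] ++ [leaf.1])
     else d.insert leaf.2.2.2.2.2.2 [leaf.1])
    = d.modify leaf.2.2.2.2.2.2 [] (· ++ [leaf.1]) := by
  by_cases h : d.contains leaf.2.2.2.2.2.2 = true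
  · simp [h, PySem.Dict.modify]
  · simp only [Bool.not_eq_true] at h
    simp [PySem.Dict.modify, PySem.Dict.getD_of_not_contains, h]

theorem pvChildDict_eq_modify (tree_orig : List PvLeaf) :
    pvChildDict tree_orig =
    (tree_orig.map (fun l => (l.2.2.2.2.2.2, l.1))).foldl
      (fun d p => d.modify p.1 [] (· ++ [p.2])) PySem.Dict.empty := by
  unfold pvChildDict
  rw [List.foldl_map]
  apply PySem.List.foldl_congr_mem
  intro d leaf _
  exact pvChildDict_step d leaf

theorem pvChildDict_getD (tree_orig : List PvLeaf) (idx : Int) :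
    (pvChildDict tree_orig).getD idx [] =
    (tree_orig.filter (fun l => l.2.2.2.2.2.2 == idx)).map (·.1) := by
  rw [pvChildDict_eq_modify, PySem.Dict.getD_foldl_modify_append]
  simp [List.filter_map, Function.comp_def]

theorem pvChildDict_contains (tree_orig : List PvLeaf) (idx : Int) :
    (pvChildDict tree_orig).contains idx = tree_orig.any (fun l => l.2.2.2.2.2.2 == idx) := by
  rw [pvChildDict_eq_modify]
  rw [Bool.eq_iff_iff, PySem.Dict.contains_iff_mem_keys]
  rw [PySem.Dict.keys_foldl_modify_key]
  rw [show PySem.Set.update (PySem.Dict.empty : PySem.Dict Int (List Int)).keys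
        (((tree_orig.map (fun l => (l.2.2.2.2.2.2, l.1)))).map (·.1)) =
      PySem.Set.ofList (((tree_orig.map (fun l => (l.2.2.2.2.2.2, l.1)))).map (·.1)) from rfl]
  simp [PySem.Set.mem_ofList, List.any_eq_true]

theorem pv_child_scan (tree_orig : List PvLeaf) (imgshape : Int × Int × Int) (idx : Int)
    (inbox : PySem.Set Int)
    (hinbox : ∀ ch, pvPosInBox (pvPosDict tree_orig) ch imgshape = inbox.contains ch) :
    (if (pvChildDict tree_orig).contains idx then
      ((pvChildDict tree_orig).getD idx []).any (fun ch => pvPosInBox (pvPosDict tree_orig) ch imgshape)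
     else false) =
    (PySem.Set.ofList
      ((tree_orig.filter (fun leaf => inbox.contains leaf.1)).map (·.2.2.2.2.2.2))).contains idx := by
  rw [pvChildDict_getD, pvChildDict_contains]
  simp only [hinbox]
  rw [Bool.eq_iff_iff]
  by_cases hc : tree_orig.any (fun l => l.2.2.2.2.2.2 == idx) = true
  · rw [hc]
    simp only [if_true, List.any_map, List.any_filter]
    simp [List.any_eq_true, PySem.Set.mem_ofList, List.mem_map, List.mem_filter]
  · rw [if_neg hc]
    simp only [List.any_eq_true, not_exists, not_and] at hc
    simp [PySem.Set.mem_ofList, List.mem_map, List.mem_filter]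
    intro a b c d e f hmem _
    exact absurd (by simp : (((a,b,c,d,e,f,idx) : PvLeaf).2.2.2.2.2.2 == idx) = true) (hc _ hmem)

theorem pv_nested_if {α : Type} (c1 c2 c3 : Bool) (app acc : α) :
    (if c1 then app else if c2 then (if c3 then app else acc) else acc) =
    (if c1 || (if c2 then c3 else false) then app else acc) := by
  cases c1 <;> cases c2 <;> cases c3 <;> simp

theorem pv_main (tree_orig : List PvLeaf) (imgshape : Int × Int × Int) (keep : Bool) :
    trim_out_of_box tree_orig imgshape keep = trim_out_of_box_alt tree_orig imgshape keep := by
  simp only [trim_out_of_box, trim_out_of_box_alt]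
  apply PySem.List.foldl_congr_mem
  intro acc leaf _
  by_cases hib : pv_is_in_box leaf.2.2.1 leaf.2.2.2.1 leaf.2.2.2.2.1 imgshape = true
  · simp only [hib, if_true]
  · simp only [Bool.not_eq_true] at hib
    simp only [hib, Bool.false_eq_true, if_false]
    by_cases hk : keep = true
    · simp only [hk, if_true, Bool.true_and]
      rw [pv_nested_if, pv_contains_and_chk, pvChk_eq_inbox tree_orig imgshape,
          pv_child_scan tree_orig imgshape leaf.1 _ (fun ch => pvChk_eq_inbox tree_orig imgshape ch)]
    · simp only [Bool.not_eq_true] at hk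
      simp [hk]


-- ===== VERDICT (by name: the statement is the Claim_ definition above) =====
theorem trim_out_of_box_spec : Claim_equal_trim_out_of_box := by
  intro tree_orig imgshape keep_candidate_points _
  unfold Spec_trim_out_of_box
  exact pv_main tree_orig imgshape keep_candidate_points
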